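-- pv_equiv track=rewrite | github.com/Alirezasaeedi2000/chat-to-sql-cursor | query_processor.py | _maybe_build_table_listing
-- ===== SOURCE A (Python) =====
-- from typing import Any, Dict, List, Optional, Tuple
--
-- def _maybe_build_table_listing(user_query: str) -> Optional[str]:
--     """Build simple table listing queries for TABLE mode.
--
--     Handles queries like:
--     - "List all unique bake types"
--     - "Show me recent batches"
--     - "List workers by section"
--     """
--     q = user_query.lower()
--
--     # Unique/distinct value queries
--     if any(pattern in q for pattern in ['unique', 'distinct', 'all unique']):
--         if 'bake type' in q:
--             return "SELECT DISTINCT bakeType FROM `packaging_info` ORDER BY bakeType LIMIT 50"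
--         elif 'waste type' in q:
--             return "SELECT DISTINCT type FROM `pack_waste` ORDER BY type LIMIT 50"
--
--     # Recent/latest queries
--     if any(pattern in q for pattern in ['recent', 'latest', 'newest']):
--         if 'batch' in q or 'production' in q:
--             return "SELECT * FROM `production_info` ORDER BY date DESC LIMIT 50"
--         elif 'packaging' in q:
--             return "SELECT * FROM `packaging_info` ORDER BY date DESC LIMIT 50"
--
--     # Grouping queries
--     if 'by' in q:
--         if 'worker' in q and 'section' in q:
--             return "SELECT section, COUNT(*) as count FROM `workers` GROUP BY section ORDER BY count DESC LIMIT 50"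
--         elif 'bake type' in q:
--             return "SELECT bakeType, COUNT(*) as count FROM `packaging_info` GROUP BY bakeType ORDER BY count DESC LIMIT 50"
--         elif 'waste type' in q:
--             return "SELECT type, COUNT(*) as count FROM `pack_waste` GROUP BY type ORDER BY count DESC LIMIT 50"
--
--     return None
-- ===== SOURCE B (Python) =====
-- def _maybe_build_table_listing(user_query):
--     """Ordered rule table: first rule whose full conjunction of keyword
--     groups (each group = any-of alternatives) matches wins; else None."""
--     q = user_query.lower()
--     rules = [
--         ([['unique', 'distinct', 'all unique'], ['bake type']],
--          "SELECT DISTINCT bakeType FROM `packaging_info` ORDER BY bakeType LIMIT 50"),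
--         ([['unique', 'distinct', 'all unique'], ['waste type']],
--          "SELECT DISTINCT type FROM `pack_waste` ORDER BY type LIMIT 50"),
--         ([['recent', 'latest', 'newest'], ['batch', 'production']],
--          "SELECT * FROM `production_info` ORDER BY date DESC LIMIT 50"),
--         ([['recent', 'latest', 'newest'], ['packaging']],
--          "SELECT * FROM `packaging_info` ORDER BY date DESC LIMIT 50"),
--         ([['by'], ['worker'], ['section']],
--          "SELECT section, COUNT(*) as count FROM `workers` GROUP BY section ORDER BY count DESC LIMIT 50"),
--         ([['by'], ['bake type']],
--          "SELECT bakeType, COUNT(*) as count FROM `packaging_info` GROUP BY bakeType ORDER BY count DESC LIMIT 50"),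
--         ([['by'], ['waste type']],
--          "SELECT type, COUNT(*) as count FROM `pack_waste` GROUP BY type ORDER BY count DESC LIMIT 50"),
--     ]
--     for groups, sql in rules:
--         if all(any(k in q for k in g) for g in groups):
--             return sql
--     return None
-- ===== Notes on version B (the rewrite author's own statement) =====
-- stated objective: simpler
-- what changed: Replaced the nested if/elif keyword cascade with a single ordered rule table of (keyword-group conjunction, SQL) pairs scanned once for the first matching rule.
import Mathlib
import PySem

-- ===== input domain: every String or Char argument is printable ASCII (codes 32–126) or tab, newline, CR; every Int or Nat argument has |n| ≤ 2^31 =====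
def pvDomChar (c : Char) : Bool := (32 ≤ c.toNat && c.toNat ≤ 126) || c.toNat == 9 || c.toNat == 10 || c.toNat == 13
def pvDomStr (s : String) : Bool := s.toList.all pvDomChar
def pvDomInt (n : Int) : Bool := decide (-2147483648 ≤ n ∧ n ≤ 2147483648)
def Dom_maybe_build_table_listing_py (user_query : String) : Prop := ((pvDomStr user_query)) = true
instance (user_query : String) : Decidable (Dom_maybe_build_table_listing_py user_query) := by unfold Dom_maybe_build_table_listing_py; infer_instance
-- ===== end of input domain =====

-- B replaces A's nested if/elif keyword cascade with a flat ordered rule table scanned for the first match (simpler decomposition, same cost).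


-- ===== PORT A =====
-- the '# Grouping queries' block (reached by fallthrough from the two earlier blocks)
def pvBlockBy (q : String) : Option String :=
  if PySem.Str.isIn "by" q then
    if PySem.Str.isIn "worker" q && PySem.Str.isIn "section" q then
      some "SELECT section, COUNT(*) as count FROM `workers` GROUP BY section ORDER BY count DESC LIMIT 50"
    else if PySem.Str.isIn "bake type" q then
      some "SELECT bakeType, COUNT(*) as count FROM `packaging_info` GROUP BY bakeType ORDER BY count DESC LIMIT 50"
    else if PySem.Str.isIn "waste type" q then
      some "SELECT type, COUNT(*) as count FROM `pack_waste` GROUP BY type ORDER BY count DESC LIMIT 50"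
    else none
  else none

-- the '# Recent/latest queries' block, falling through to pvBlockBy
def pvBlockRecent (q : String) : Option String :=
  if (["recent", "latest", "newest"].any (fun p => PySem.Str.isIn p q)) then
    if PySem.Str.isIn "batch" q || PySem.Str.isIn "production" q then
      some "SELECT * FROM `production_info` ORDER BY date DESC LIMIT 50"
    else if PySem.Str.isIn "packaging" q then
      some "SELECT * FROM `packaging_info` ORDER BY date DESC LIMIT 50"
    else pvBlockBy q
  else pvBlockBy q

def maybe_build_table_listing_py (user_query : String) : Option String :=
  let q := PySem.Str.lower user_query
  if (["unique", "distinct", "all unique"].any (fun p => PySem.Str.isIn p q)) then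
    if PySem.Str.isIn "bake type" q then
      some "SELECT DISTINCT bakeType FROM `packaging_info` ORDER BY bakeType LIMIT 50"
    else if PySem.Str.isIn "waste type" q then
      some "SELECT DISTINCT type FROM `pack_waste` ORDER BY type LIMIT 50"
    else pvBlockRecent q
  else pvBlockRecent q

-- ===== PORT B =====
-- ordered rule table: (list of keyword groups, SQL); a rule matches when every group has some keyword in q
def pvRules : List (List (List String) × String) :=
  [ ([["unique", "distinct", "all unique"], ["bake type"]],
     "SELECT DISTINCT bakeType FROM `packaging_info` ORDER BY bakeType LIMIT 50"),
    ([["unique", "distinct", "all unique"], ["waste type"]],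
     "SELECT DISTINCT type FROM `pack_waste` ORDER BY type LIMIT 50"),
    ([["recent", "latest", "newest"], ["batch", "production"]],
     "SELECT * FROM `production_info` ORDER BY date DESC LIMIT 50"),
    ([["recent", "latest", "newest"], ["packaging"]],
     "SELECT * FROM `packaging_info` ORDER BY date DESC LIMIT 50"),
    ([[ "by"], ["worker"], ["section"]],
     "SELECT section, COUNT(*) as count FROM `workers` GROUP BY section ORDER BY count DESC LIMIT 50"),
    ([[ "by"], ["bake type"]],
     "SELECT bakeType, COUNT(*) as count FROM `packaging_info` GROUP BY bakeType ORDER BY count DESC LIMIT 50"),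
    ([[ "by"], ["waste type"]],
     "SELECT type, COUNT(*) as count FROM `pack_waste` GROUP BY type ORDER BY count DESC LIMIT 50") ]

def maybe_build_table_listing_py_alt (user_query : String) : Option String :=
  let q := PySem.Str.lower user_query
  (pvRules.find? (fun r => r.1.all (fun g => g.any (fun k => PySem.Str.isIn k q)))).map (fun r => r.2)

-- ===== PRECONDITION & SPEC =====
def Spec_maybe_build_table_listing_py (user_query : String) (out : Option String) : Prop := out = maybe_build_table_listing_py_alt user_query
instance (user_query : String) (out : Option String) : Decidable (Spec_maybe_build_table_listing_py user_query out) := by unfold Spec_maybe_build_table_listing_py; infer_instance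

-- ===== CLAIM (what is proved, stated in full; the proofs are below) =====
def Claim_equal_maybe_build_table_listing_py : Prop := ∀ (user_query : String), Dom_maybe_build_table_listing_py user_query → Spec_maybe_build_table_listing_py user_query (maybe_build_table_listing_py user_query)


-- ===== LEMMAS AND PROOFS =====
-- abstract forms of A's cascade over the 14 keyword atoms (proof-only helpers)
def pvABy (bt wt byq w sec : Bool) : Option String :=
  if byq then
    if w && sec then some "SELECT section, COUNT(*) as count FROM `workers` GROUP BY section ORDER BY count DESC LIMIT 50"
    else if bt then some "SELECT bakeType, COUNT(*) as count FROM `packaging_info` GROUP BY bakeType ORDER BY count DESC LIMIT 50"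
    else if wt then some "SELECT type, COUNT(*) as count FROM `pack_waste` GROUP BY type ORDER BY count DESC LIMIT 50"
    else none
  else none

def pvARecent (bt wt r l n b p pk byq w sec : Bool) : Option String :=
  if r || (l || (n || false)) then
    if b || p then some "SELECT * FROM `production_info` ORDER BY date DESC LIMIT 50"
    else if pk then some "SELECT * FROM `packaging_info` ORDER BY date DESC LIMIT 50"
    else pvABy bt wt byq w sec
  else pvABy bt wt byq w sec

def pvA (u d au bt wt r l n b p pk byq w sec : Bool) : Option String :=
  if u || (d || (au || false)) then
    if bt then some "SELECT DISTINCT bakeType FROM `packaging_info` ORDER BY bakeType LIMIT 50"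
    else if wt then some "SELECT DISTINCT type FROM `pack_waste` ORDER BY type LIMIT 50"
    else pvARecent bt wt r l n b p pk byq w sec
  else pvARecent bt wt r l n b p pk byq w sec

-- first-match over a boolean rule table (abstract form of B's scan)
def pvFind (rl : List (Bool × String)) : Option String :=
  (rl.find? (fun r => r.1)).map (fun r => r.2)

theorem pv_find?_map {A : Type} (p : A → Bool) (l : List (A × String)) :
    ((l.map (fun r => (p r.1, r.2))).find? (fun r => r.1)).map (fun r => r.2)
      = (l.find? (fun r => p r.1)).map (fun r => r.2) := by
  induction l with
  | nil => rfl
  | cons h t ih =>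
    by_cases hp : p h.1 = true
    · simp [List.find?_cons_of_pos, hp]
    · simp only [List.map_cons]
      rw [List.find?_cons_of_neg (by simpa using hp), List.find?_cons_of_neg (by simpa using hp)]
      exact ih

theorem pv_key : ∀ (u d au bt wt r l n b p pk byq w sec : Bool),
    pvA u d au bt wt r l n b p pk byq w sec =
      pvFind
        [ ((u || (d || (au || false))) && ((bt || false) && true),
           "SELECT DISTINCT bakeType FROM `packaging_info` ORDER BY bakeType LIMIT 50"),
          ((u || (d || (au || false))) && ((wt || false) && true),
           "SELECT DISTINCT type FROM `pack_waste` ORDER BY type LIMIT 50"),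
          ((r || (l || (n || false))) && ((b || (p || false)) && true),
           "SELECT * FROM `production_info` ORDER BY date DESC LIMIT 50"),
          ((r || (l || (n || false))) && ((pk || false) && true),
           "SELECT * FROM `packaging_info` ORDER BY date DESC LIMIT 50"),
          ((byq || false) && ((w || false) && ((sec || false) && true)),
           "SELECT section, COUNT(*) as count FROM `workers` GROUP BY section ORDER BY count DESC LIMIT 50"),
          ((byq || false) && ((bt || false) && true),
           "SELECT bakeType, COUNT(*) as count FROM `packaging_info` GROUP BY bakeType ORDER BY count DESC LIMIT 50"),
          ((byq || false) && ((wt || false) && true),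
           "SELECT type, COUNT(*) as count FROM `pack_waste` GROUP BY type ORDER BY count DESC LIMIT 50") ] := by decide

-- ===== VERDICT (by name: the statement is the Claim_ definition above) =====
theorem maybe_build_table_listing_py_spec : Claim_equal_maybe_build_table_listing_py := by
  intro user_query _
  unfold Spec_maybe_build_table_listing_py
  have hA : maybe_build_table_listing_py user_query =
      pvA (PySem.Str.isIn "unique" (PySem.Str.lower user_query))
          (PySem.Str.isIn "distinct" (PySem.Str.lower user_query))
          (PySem.Str.isIn "all unique" (PySem.Str.lower user_query))
          (PySem.Str.isIn "bake type" (PySem.Str.lower user_query))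
          (PySem.Str.isIn "waste type" (PySem.Str.lower user_query))
          (PySem.Str.isIn "recent" (PySem.Str.lower user_query))
          (PySem.Str.isIn "latest" (PySem.Str.lower user_query))
          (PySem.Str.isIn "newest" (PySem.Str.lower user_query))
          (PySem.Str.isIn "batch" (PySem.Str.lower user_query))
          (PySem.Str.isIn "production" (PySem.Str.lower user_query))
          (PySem.Str.isIn "packaging" (PySem.Str.lower user_query))
          (PySem.Str.isIn "by" (PySem.Str.lower user_query))
          (PySem.Str.isIn "worker" (PySem.Str.lower user_query))
          (PySem.Str.isIn "section" (PySem.Str.lower user_query)) := rfl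
  have hB : maybe_build_table_listing_py_alt user_query =
      pvFind (pvRules.map (fun rr =>
        (rr.1.all (fun g => g.any (fun k => PySem.Str.isIn k (PySem.Str.lower user_query))), rr.2))) := by
    unfold maybe_build_table_listing_py_alt pvFind
    exact (pv_find?_map (fun gs => gs.all (fun g => g.any (fun k => PySem.Str.isIn k (PySem.Str.lower user_query)))) pvRules).symm
  rw [hA, hB]
  simp only [pvRules, List.map_cons, List.map_nil, List.all_cons, List.all_nil,
    List.any_cons, List.any_nil]
  exact pv_key _ _ _ _ _ _ _ _ _ _ _ _ _ _
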